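-- pv_equiv track=rewrite | github.com/protolambda/partial_fft | das_fft.py | das_fft
-- ===== SOURCE A (Python) =====
-- def das_fft(a: list, modulus: int, domain: list, inverse_domain: list, inv2: int) -> list:
--     if len(a) == 2:
--         a_half0 = a[0]
--         a_half1 = a[1]
--         x = (((a_half0 + a_half1) % modulus) * inv2) % modulus
--         # y = (((a_half0 - x) % modulus) * inverse_domain[0]) % modulus     # inverse_domain[0] will always be 1
--         y = (a_half0 - x) % modulus
--
--         y_times_root = y * domain[1]
--         return [
--             (x + y_times_root) % modulus,
--             (x - y_times_root) % modulus
--         ]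
--
--     if len(a) == 1:  # for illustration purposes, neat simplification. Inputs are always a power of two, dead code.
--         return a
--
--     half = len(a)
--     halfhalf = half // 2
--
--     L0 = [0] * halfhalf
--     R0 = [0] * halfhalf
--     for i, (a_half0, a_half1) in enumerate(zip(a[:halfhalf], a[halfhalf:])):
--         L0[i] = (((a_half0 + a_half1) % modulus) * inv2) % modulus
--         R0[i] = (((a_half0 - L0[i]) % modulus) * inverse_domain[i * 2]) % modulus
--
--     L1 = das_fft(L0, modulus, domain[::2], inverse_domain[::2], inv2)
--     R1 = das_fft(R0, modulus, domain[::2], inverse_domain[::2], inv2)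
--
--     b = [0] * half
--     for i, (x, y) in enumerate(zip(L1, R1)):
--         y_times_root = y * domain[1 + i * 2]
--         b[i] = (x + y_times_root) % modulus
--         b[halfhalf + i] = (x - y_times_root) % modulus
--
--     return b
-- ===== SOURCE B (Python) =====
-- def das_fft(a: list, modulus: int, domain: list, inverse_domain: list, inv2: int) -> list:
--     # Iterative evaluation with an explicit task stack instead of recursion; a
--     # doubling stride into domain/inverse_domain replaces repeated [::2] slicing,
--     # so the root tables are never copied.
--     tasks = [("eval", a, 1)]
--     results = []
--     while tasks:
--         task = tasks.pop()
--         if task[0] == "eval":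
--             _, blk, s = task
--             if len(blk) == 2:
--                 x = (((blk[0] + blk[1]) % modulus) * inv2) % modulus
--                 y = (blk[0] - x) % modulus
--                 t = y * domain[s]
--                 results.append([(x + t) % modulus, (x - t) % modulus])
--             elif len(blk) <= 1:
--                 results.append(blk)
--             else:
--                 hh = len(blk) // 2
--                 L0 = []
--                 R0 = []
--                 for i in range(hh):
--                     x = (((blk[i] + blk[hh + i]) % modulus) * inv2) % modulus
--                     L0.append(x)
--                     R0.append((((blk[i] - x) % modulus) * inverse_domain[2 * i * s]) % modulus)
--                 tasks.append(("combine", len(blk), s))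
--                 tasks.append(("eval", R0, 2 * s))
--                 tasks.append(("eval", L0, 2 * s))
--         else:
--             _, half, s = task
--             hh = half // 2
--             R1 = results.pop()
--             L1 = results.pop()
--             b = [0] * half
--             for i in range(hh):
--                 t = R1[i] * domain[s * (1 + 2 * i)]
--                 b[i] = (L1[i] + t) % modulus
--                 b[hh + i] = (L1[i] - t) % modulus
--             results.append(b)
--     return results.pop()
-- ===== Notes on version B (the rewrite author's own statement) =====
-- stated objective: alternative
-- what changed: Replaces the recursion (which allocates sliced copies domain[::2]/inverse_domain[::2] at every level and recurses twice) by an iterative explicit task stack: 'eval' tasks split a block into L0/R0 children carrying a doubled stride into the original unsliced tables, and 'combine' tasks pop the two child results and butterfly them back together; no recursive calls and no table copies.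
import Mathlib
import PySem

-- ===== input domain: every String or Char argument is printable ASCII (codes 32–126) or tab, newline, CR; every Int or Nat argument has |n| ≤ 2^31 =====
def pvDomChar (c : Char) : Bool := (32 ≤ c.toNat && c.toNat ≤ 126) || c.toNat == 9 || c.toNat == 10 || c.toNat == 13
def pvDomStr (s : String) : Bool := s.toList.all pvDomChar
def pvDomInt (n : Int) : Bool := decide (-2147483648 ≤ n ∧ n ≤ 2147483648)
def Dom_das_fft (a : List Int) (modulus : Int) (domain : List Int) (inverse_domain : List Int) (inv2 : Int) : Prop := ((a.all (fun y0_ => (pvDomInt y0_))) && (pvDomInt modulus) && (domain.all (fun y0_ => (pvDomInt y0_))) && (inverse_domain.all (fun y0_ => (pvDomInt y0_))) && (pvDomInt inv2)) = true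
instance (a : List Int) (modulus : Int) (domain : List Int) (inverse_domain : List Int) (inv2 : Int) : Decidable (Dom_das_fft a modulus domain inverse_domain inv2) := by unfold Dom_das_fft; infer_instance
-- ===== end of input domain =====

-- B evaluates the recursive DAS-FFT iteratively with an explicit task stack and a doubling
-- stride into the unsliced root tables (instead of recursion over [::2]-sliced copies);
-- same return values proved.

-- ===== PORT A =====
-- 'for i, (a_half0, a_half1) in enumerate(zip(a[:halfhalf], a[halfhalf:])): L0[i] = …; R0[i] = …':
-- the loop fills the preallocated L0/R0 at indices 0,1,… in order, built here as the same two
-- lists. A nonnegative in-range Python index xs[i] is List.getD (in range under Pre_das_fft).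
def aSplitLoop (m inv2 : Int) (invd : List Int) : List (Int × Int) → Nat → List Int × List Int
  | [], _ => ([], [])
  | (a0, a1) :: rest, i =>
    let x := PySem.Int.mod (PySem.Int.mod (a0 + a1) m * inv2) m
    let y := PySem.Int.mod (PySem.Int.mod (a0 - x) m * invd.getD (i * 2) 0) m
    let r := aSplitLoop m inv2 invd rest (i + 1)
    (x :: r.1, y :: r.2)

-- 'for i, (x, y) in enumerate(zip(L1, R1)): b[i] = …; b[halfhalf + i] = …': the writes fill
-- b[0..] and b[halfhalf..] at consecutive indices, built here as the front and back halves of b.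
def aCombineLoop (m : Int) (dom : List Int) : List (Int × Int) → Nat → List Int × List Int
  | [], _ => ([], [])
  | (x, y) :: rest, i =>
    let t := y * dom.getD (1 + i * 2) 0
    let r := aCombineLoop m dom rest (i + 1)
    (PySem.Int.mod (x + t) m :: r.1, PySem.Int.mod (x - t) m :: r.2)

-- xs[::2] (PySem.List.slice? with step 2, which is never none since 2 ≠ 0)
def everySecond (l : List Int) : List Int := (PySem.List.slice? l none none 2).getD []

-- length lemmas cited by das_fft's decreasing_by
theorem aSplitLoop_fst_length (m inv2 : Int) (invd : List Int) :
    ∀ (ps : List (Int × Int)) (i : Nat), (aSplitLoop m inv2 invd ps i).1.length = ps.length := by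
  intro ps
  induction ps with
  | nil => intro i; simp [aSplitLoop]
  | cons p rest ih => intro i; cases p; simp [aSplitLoop, ih]

theorem aSplitLoop_snd_length (m inv2 : Int) (invd : List Int) :
    ∀ (ps : List (Int × Int)) (i : Nat), (aSplitLoop m inv2 invd ps i).2.length = ps.length := by
  intro ps
  induction ps with
  | nil => intro i; simp [aSplitLoop]
  | cons p rest ih => intro i; cases p; simp [aSplitLoop, ih]

def das_fft (a : List Int) (modulus : Int) (domain : List Int) (inverse_domain : List Int) (inv2 : Int) : List Int :=
  if a.length = 2 then
    let a0 := a.getD 0 0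
    let a1 := a.getD 1 0
    let x := PySem.Int.mod (PySem.Int.mod (a0 + a1) modulus * inv2) modulus
    let y := PySem.Int.mod (a0 - x) modulus
    let t := y * domain.getD 1 0
    [PySem.Int.mod (x + t) modulus, PySem.Int.mod (x - t) modulus]
  else if a.length ≤ 1 then a  -- len(a) == 1 branch; also the totality guard at len 0, where the Python recurses forever
  else
    let hh := a.length / 2
    -- a[:halfhalf] / a[halfhalf:] are take/drop (the PySem.List.slice_to_natCast / slice_from_natCast forms)
    let LR := aSplitLoop modulus inv2 inverse_domain ((a.take hh).zip (a.drop hh)) 0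
    let L1 := das_fft LR.1 modulus (everySecond domain) (everySecond inverse_domain) inv2
    let R1 := das_fft LR.2 modulus (everySecond domain) (everySecond inverse_domain) inv2
    let FB := aCombineLoop modulus domain (L1.zip R1) 0
    -- b = [0] * half with writes at 0..z-1 and hh..hh+z-1 (z = len(zip(L1, R1))): the
    -- untouched cells stay 0
    let z := (L1.zip R1).length
    FB.1 ++ List.replicate (hh - z) 0 ++ FB.2 ++ List.replicate (a.length - hh - z) 0
termination_by a.length
decreasing_by
  · simp [aSplitLoop_fst_length]; omega
  · simp [aSplitLoop_snd_length]; omega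

-- ===== PORT B =====
-- 'for i in range(hh): … L0.append(…); R0.append(…)' reading blk[i], blk[hh+i], inverse_domain[2*i*s]
def bSplitLoop (m inv2 : Int) (invd : List Int) (stride : Nat) (blk : List Int) (hh : Nat) : Nat → Nat → List Int × List Int
  | _, 0 => ([], [])
  | i, cnt + 1 =>
    let x := PySem.Int.mod (PySem.Int.mod (blk.getD i 0 + blk.getD (hh + i) 0) m * inv2) m
    let r := PySem.Int.mod (PySem.Int.mod (blk.getD i 0 - x) m * invd.getD (2 * i * stride) 0) m
    let rest := bSplitLoop m inv2 invd stride blk hh (i + 1) cnt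
    (x :: rest.1, r :: rest.2)

-- 'for i in range(hh): … b[i] = …; b[hh + i] = …' reading L1[i], R1[i], domain[s*(1+2*i)];
-- as in port A's combine, the preallocated b is its filled front, filled back, leftover zeros
def bMergeLoop (m : Int) (dom : List Int) (stride : Nat) (L R : List Int) : Nat → Nat → List Int × List Int
  | _, 0 => ([], [])
  | i, cnt + 1 =>
    let t := R.getD i 0 * dom.getD (stride * (1 + 2 * i)) 0
    let rest := bMergeLoop m dom stride L R (i + 1) cnt
    (PySem.Int.mod (L.getD i 0 + t) m :: rest.1, PySem.Int.mod (L.getD i 0 - t) m :: rest.2)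

-- the two task shapes pushed on B's stack: ("eval", blk, s) and ("combine", half, s)
inductive PvTask where
  | eval : List Int → Nat → PvTask
  | combine : Nat → Nat → PvTask

-- termination measure for the while loop (not part of the Python; proof device only)
def pvCost : PvTask → Nat
  | PvTask.eval blk _ => blk.length * blk.length + 1
  | PvTask.combine _ _ => 1

-- lengths of the split halves (cited by bRun's decreasing_by)
theorem bSplitLoop_fst_length (m inv2 : Int) (invd : List Int) (stride : Nat) (blk : List Int) (hh : Nat) :
    ∀ (cnt i : Nat), (bSplitLoop m inv2 invd stride blk hh i cnt).1.length = cnt := by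
  intro cnt
  induction cnt with
  | zero => intro i; simp [bSplitLoop]
  | succ n ih => intro i; simp [bSplitLoop, ih]

theorem bSplitLoop_snd_length (m inv2 : Int) (invd : List Int) (stride : Nat) (blk : List Int) (hh : Nat) :
    ∀ (cnt i : Nat), (bSplitLoop m inv2 invd stride blk hh i cnt).2.length = cnt := by
  intro cnt
  induction cnt with
  | zero => intro i; simp [bSplitLoop]
  | succ n ih => intro i; simp [bSplitLoop, ih]

-- 'while tasks: task = tasks.pop(); …' — head of the list is the top of each stack
def bRun (m inv2 : Int) (dom invd : List Int) : List PvTask → List (List Int) → List (List Int)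
  | [], results => results
  | PvTask.eval blk s :: tasks, results =>
    if blk.length = 2 then
      let x := PySem.Int.mod (PySem.Int.mod (blk.getD 0 0 + blk.getD 1 0) m * inv2) m
      let y := PySem.Int.mod (blk.getD 0 0 - x) m
      let t := y * dom.getD s 0
      bRun m inv2 dom invd tasks ([PySem.Int.mod (x + t) m, PySem.Int.mod (x - t) m] :: results)
    else if blk.length ≤ 1 then
      bRun m inv2 dom invd tasks (blk :: results)
    else
      let hh := blk.length / 2
      let LR := bSplitLoop m inv2 invd s blk hh 0 hh
      bRun m inv2 dom invd
        (PvTask.eval LR.1 (2 * s) :: PvTask.eval LR.2 (2 * s) :: PvTask.combine blk.length s :: tasks)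
        results
  | PvTask.combine half s :: tasks, results =>
    match results with
    | r1 :: l1 :: rest =>
      let hh := half / 2
      let FB := bMergeLoop m dom s l1 r1 0 hh
      bRun m inv2 dom invd tasks ((FB.1 ++ FB.2 ++ List.replicate (half - 2 * hh) 0) :: rest)
    | _ => results  -- 'results.pop()' underflow: unreachable from the entry point
termination_by tasks _ => (tasks.map pvCost).sum
decreasing_by
  · simp [pvCost]
  · simp [pvCost]
  · simp [pvCost, bSplitLoop_fst_length, bSplitLoop_snd_length]
    rename_i hne2 hgt1
    have h3 : 3 ≤ blk.length := by omega
    have hhh : 1 ≤ blk.length / 2 ∧ 2 * (blk.length / 2) ≤ blk.length := by omega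
    nlinarith [hhh.1, hhh.2]
  · simp [pvCost]

def das_fft_alt (a : List Int) (modulus : Int) (domain : List Int) (inverse_domain : List Int) (inv2 : Int) : List Int :=
  (bRun modulus inv2 domain inverse_domain [PvTask.eval a 1] []).headD []

-- ===== PRECONDITION & SPEC =====
-- Exactly the inputs on which the Python A returns (it raises everywhere else):
-- a nonempty (on [] the recursion never terminates: RecursionError), modulus ≠ 0 once a butterfly
-- runs (else ZeroDivisionError), and the two root tables long enough for every index the
-- recursion reads (max domain index 2*(n//2) - 1, max inverse_domain index 2*(n//2) - 2).
def Pre_das_fft (a : List Int) (modulus : Int) (domain : List Int) (inverse_domain : List Int) (inv2 : Int) : Prop :=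
  a.length ≠ 0 ∧
  (2 ≤ a.length → (modulus ≠ 0 ∧ 2 * (a.length / 2) ≤ domain.length)) ∧
  (3 ≤ a.length → 2 * (a.length / 2) - 1 ≤ inverse_domain.length)
instance (a : List Int) (modulus : Int) (domain : List Int) (inverse_domain : List Int) (inv2 : Int) : Decidable (Pre_das_fft a modulus domain inverse_domain inv2) := by unfold Pre_das_fft; infer_instance

def pvWitness_das_fft : List Int × Int × List Int × List Int × Int := ([1, 2, 3, 4], 5, [1, 2, 3, 4], [1, 1, 1], 3)

def Spec_das_fft (a : List Int) (modulus : Int) (domain : List Int) (inverse_domain : List Int) (inv2 : Int) (out : List Int) : Prop := out = das_fft_alt a modulus domain inverse_domain inv2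
instance (a : List Int) (modulus : Int) (domain : List Int) (inverse_domain : List Int) (inv2 : Int) (out : List Int) : Decidable (Spec_das_fft a modulus domain inverse_domain inv2 out) := by unfold Spec_das_fft; infer_instance

-- ===== CLAIM (what is proved, stated in full; the proofs are below) =====
def Claim_equal_das_fft : Prop := ∀ (a : List Int) (modulus : Int) (domain : List Int) (inverse_domain : List Int) (inv2 : Int), Dom_das_fft a modulus domain inverse_domain inv2 → Pre_das_fft a modulus domain inverse_domain inv2 → Spec_das_fft a modulus domain inverse_domain inv2 (das_fft a modulus domain inverse_domain inv2)

-- ===== LEMMAS AND PROOFS =====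

-- l[::s] for s ≥ 1: the proof-side view of the recursion's repeated [::2] slicing
def sliceEvery (s : Nat) : List Int → List Int
  | [] => []
  | x :: xs => x :: sliceEvery s (xs.drop (s - 1))
termination_by l => l.length
decreasing_by simp

theorem sliceEvery_nil (s : Nat) : sliceEvery s [] = [] := by rw [sliceEvery]

theorem sliceEvery_cons (s : Nat) (x : Int) (xs : List Int) :
    sliceEvery s (x :: xs) = x :: sliceEvery s (xs.drop (s - 1)) := by rw [sliceEvery]

theorem getD_drop (l : List Int) (k j : Nat) (d : Int) : (l.drop k).getD j d = l.getD (k + j) d := by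
  simp [List.getD_eq_getElem?_getD, List.getElem?_drop]

theorem sliceEvery_getD (s : Nat) (hs : 1 ≤ s) (d : Int) :
    ∀ (i : Nat) (l : List Int), (sliceEvery s l).getD i d = l.getD (i * s) d := by
  intro i
  induction i with
  | zero => intro l; cases l <;> simp [sliceEvery_nil, sliceEvery_cons]
  | succ n ih =>
    intro l
    cases l with
    | nil => simp [sliceEvery_nil]
    | cons x xs =>
      rw [sliceEvery_cons, List.getD_cons_succ, ih, getD_drop]
      rw [show (n + 1) * s = (s - 1 + n * s) + 1 by rw [Nat.add_mul, one_mul]; omega]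
      rw [List.getD_cons_succ]

theorem sliceEvery_drop_one (s : Nat) (hs : 1 ≤ s) (l : List Int) :
    (sliceEvery s l).drop 1 = sliceEvery s (l.drop s) := by
  obtain ⟨n, rfl⟩ : ∃ n, s = n + 1 := ⟨s - 1, by omega⟩
  cases l with
  | nil => simp [sliceEvery_nil]
  | cons x xs =>
    rw [sliceEvery_cons, List.drop_one, List.tail_cons, List.drop_succ_cons]
    simp

theorem sliceEvery_comp (s : Nat) (hs : 1 ≤ s) : ∀ (l : List Int),
    sliceEvery 2 (sliceEvery s l) = sliceEvery (2 * s) l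
  | [] => by simp [sliceEvery_nil]
  | x :: xs => by
    rw [sliceEvery_cons, sliceEvery_cons, sliceEvery_cons]
    congr 1
    rw [show (2 : Nat) - 1 = 1 from rfl, sliceEvery_drop_one s hs, List.drop_drop]
    rw [show s - 1 + s = 2 * s - 1 by omega]
    exact sliceEvery_comp s hs (xs.drop (2 * s - 1))
termination_by l => l.length
decreasing_by simp

theorem sliceEvery_one : ∀ (l : List Int), sliceEvery 1 l = l
  | [] => by simp [sliceEvery_nil]
  | x :: xs => by simpa [sliceEvery_cons] using sliceEvery_one xs

-- how many elements l[::2] has, elementwise form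
theorem sliceEvery_two_eq_map : ∀ (l : List Int),
    sliceEvery 2 l = (List.range ((l.length + 1) / 2)).map (fun k => l.getD (2 * k) 0)
  | [] => by simp [sliceEvery_nil]
  | x :: xs => by
    rw [sliceEvery_cons, sliceEvery_two_eq_map (xs.drop 1)]
    rw [show (x :: xs).length = xs.length + 1 from rfl]
    rw [show (xs.length + 1 + 1) / 2 = ((xs.drop 1).length + 1) / 2 + 1 by simp; omega]
    rw [List.range_succ_eq_map, List.map_cons, List.map_map]
    congr 1
    apply List.map_congr_left
    intro k _
    simp only [Function.comp]
    rw [getD_drop]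
    rw [show 2 * (k + 1) = (1 + 2 * k) + 1 by omega, List.getD_cons_succ]
termination_by l => l.length
decreasing_by simp

-- bridge: A's xs[::2] is sliceEvery 2
theorem everySecond_eq (l : List Int) : everySecond l = sliceEvery 2 l := by
  have hfm : ∀ (ks : List Nat), (∀ k ∈ ks, 2 * k < l.length) →
      List.filterMap (fun k : Nat => l[(2 * (k : Int)).toNat]?) ks
        = ks.map (fun k => l[2 * k]?.getD 0) := by
    intro ks
    induction ks with
    | nil => intro _; simp
    | cons k rest ih =>
      intro h
      have hk : 2 * k < l.length := h k (by simp)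
      rw [List.filterMap_cons, List.map_cons]
      rw [show (2 * (k : Int)).toNat = 2 * k by omega]
      rw [ih (fun k hk => h k (by simp [hk]))]
      rw [List.getElem?_eq_getElem hk]
      rfl
  rw [sliceEvery_two_eq_map]
  simp only [everySecond, PySem.List.slice?, PySem.List.sliceIndices]
  norm_num
  rw [show (if 0 < l.length then (((l.length : Int) + 2 - 1) / 2).toNat else 0)
      = (l.length + 1) / 2 by split_ifs with h <;> omega]
  rw [hfm (List.range ((l.length + 1) / 2)) (by intro k hk; simp at hk; omega)]

-- A's split loop (over the zipped halves) and B's index-reading split loop produce the same lists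
theorem split_eq (m inv2 : Int) (invd : List Int) (s : Nat) (hs : 1 ≤ s) (blk : List Int) (hh : Nat)
    (hlen : hh = blk.length / 2) :
    ∀ (cnt i : Nat), i + cnt = hh →
      bSplitLoop m inv2 invd s blk hh i cnt
        = aSplitLoop m inv2 (sliceEvery s invd) (((blk.take hh).zip (blk.drop hh)).drop i) i := by
  have hzl : ((blk.take hh).zip (blk.drop hh)).length = hh := by simp [hlen]; omega
  intro cnt
  induction cnt with
  | zero =>
    intro i hi
    rw [List.drop_eq_nil_of_le (by omega)]
    simp [bSplitLoop, aSplitLoop]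
  | succ n ih =>
    intro cnt_i hi
    have hiz : cnt_i < ((blk.take hh).zip (blk.drop hh)).length := by omega
    rw [List.drop_eq_getElem_cons hiz, List.getElem_zip, List.getElem_take, List.getElem_drop]
    have hib : cnt_i < blk.length := by omega
    have hhib : hh + cnt_i < blk.length := by
      have := hzl
      simp [List.length_zip, List.length_take, List.length_drop] at this
      omega
    simp only [bSplitLoop, aSplitLoop]
    rw [List.getD_eq_getElem blk 0 hib, List.getD_eq_getElem blk 0 hhib]
    rw [sliceEvery_getD s hs 0]
    rw [show cnt_i * 2 * s = 2 * cnt_i * s by ring]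
    rw [ih (cnt_i + 1) (by omega)]

-- A's combine loop (over zip L1 R1) and B's merge loop produce the same lists
theorem merge_eq (m : Int) (dom : List Int) (s : Nat) (hs : 1 ≤ s) (X Y : List Int)
    (hlen : X.length = Y.length) :
    ∀ (cnt i : Nat), i + cnt = X.length →
      bMergeLoop m dom s X Y i cnt = aCombineLoop m (sliceEvery s dom) ((X.zip Y).drop i) i := by
  have hzl : (X.zip Y).length = X.length := by simp [hlen]
  intro cnt
  induction cnt with
  | zero =>
    intro i hi
    rw [List.drop_eq_nil_of_le (by omega)]
    simp [bMergeLoop, aCombineLoop]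
  | succ n ih =>
    intro i hi
    have hiz : i < (X.zip Y).length := by omega
    rw [List.drop_eq_getElem_cons hiz, List.getElem_zip]
    simp only [bMergeLoop, aCombineLoop]
    rw [List.getD_eq_getElem X 0 (by omega), List.getD_eq_getElem Y 0 (by omega)]
    rw [sliceEvery_getD s hs 0]
    rw [show (1 + i * 2) * s = s * (1 + 2 * i) by ring]
    rw [ih (i + 1) (by omega)]

theorem aCombineLoop_fst_length (m : Int) (dom : List Int) :
    ∀ (ps : List (Int × Int)) (i : Nat), (aCombineLoop m dom ps i).1.length = ps.length := by
  intro ps; induction ps with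
  | nil => intro i; simp [aCombineLoop]
  | cons p rest ih => intro i; cases p; simp [aCombineLoop, ih]

theorem aCombineLoop_snd_length (m : Int) (dom : List Int) :
    ∀ (ps : List (Int × Int)) (i : Nat), (aCombineLoop m dom ps i).2.length = ps.length := by
  intro ps; induction ps with
  | nil => intro i; simp [aCombineLoop]
  | cons p rest ih => intro i; cases p; simp [aCombineLoop, ih]

-- das_fft preserves length
theorem das_len (m inv2 : Int) (L : Nat) :
    ∀ (blk dom invd : List Int), blk.length = L →
      (das_fft blk m dom invd inv2).length = L := by
  intro blk dom invd hlen
  by_cases h2 : blk.length = 2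
  · rw [das_fft, if_pos h2]; simp; omega
  · by_cases h1 : blk.length ≤ 1
    · rw [das_fft, if_neg h2, if_pos h1]; exact hlen
    · rw [das_fft, if_neg h2, if_neg h1]
      simp only [List.length_append, List.length_replicate, aCombineLoop_fst_length,
        aCombineLoop_snd_length, List.length_zip]
      have hz : ((blk.take (blk.length / 2)).zip (blk.drop (blk.length / 2))).length
          = blk.length / 2 := by
        rw [List.length_zip, List.length_take, List.length_drop]; omega
      rw [das_len m inv2 (blk.length / 2) _ _ _ (by rw [aSplitLoop_fst_length, hz]),
          das_len m inv2 (blk.length / 2) _ _ _ (by rw [aSplitLoop_snd_length, hz])]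
      omega
termination_by L
decreasing_by all_goals omega

-- the central simulation: an 'eval blk s' task leaves das_fft of blk (against the s-strided
-- views of the tables) on the result stack and continues with the remaining tasks
theorem run_eval (m inv2 : Int) (dom invd : List Int) (L : Nat) :
    ∀ (blk : List Int) (s : Nat) (tasks : List PvTask) (results : List (List Int)),
      blk.length = L → 1 ≤ L → 1 ≤ s →
      bRun m inv2 dom invd (PvTask.eval blk s :: tasks) results
        = bRun m inv2 dom invd tasks
            (das_fft blk m (sliceEvery s dom) (sliceEvery s invd) inv2 :: results) := by
  intro blk s tasks results hlen hL hs
  by_cases h2 : blk.length = 2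
  · rw [bRun, if_pos h2]
    rw [das_fft, if_pos h2]
    dsimp only
    rw [sliceEvery_getD s hs 0 1 dom, one_mul]
  · by_cases h1 : blk.length ≤ 1
    · rw [bRun, if_neg h2, if_pos h1]
      rw [das_fft, if_neg h2, if_pos h1]
    · rw [bRun, if_neg h2, if_neg h1]
      dsimp only
      set hh := blk.length / 2 with hhh
      have hsplit : bSplitLoop m inv2 invd s blk hh 0 hh
          = aSplitLoop m inv2 (sliceEvery s invd) ((blk.take hh).zip (blk.drop hh)) 0 := by
        rw [split_eq m inv2 invd s hs blk hh hhh hh 0 (by omega), List.drop_zero]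
      set LR := bSplitLoop m inv2 invd s blk hh 0 hh with hLR
      have hL1 : LR.1.length = hh := by rw [hLR, bSplitLoop_fst_length]
      have hL2 : LR.2.length = hh := by rw [hLR, bSplitLoop_snd_length]
      have hhge : 1 ≤ hh := by omega
      rw [run_eval m inv2 dom invd hh LR.1 (2 * s) _ _ hL1 hhge (by omega)]
      rw [run_eval m inv2 dom invd hh LR.2 (2 * s) _ _ hL2 hhge (by omega)]
      rw [bRun]
      -- the combined block equals A's recursive case on blk
      congr 1
      set L1 := das_fft LR.1 m (sliceEvery (2 * s) dom) (sliceEvery (2 * s) invd) inv2 with hL1d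
      set R1 := das_fft LR.2 m (sliceEvery (2 * s) dom) (sliceEvery (2 * s) invd) inv2 with hR1d
      have hlen1 : L1.length = hh := das_len m inv2 hh LR.1 _ _ hL1
      have hlen2 : R1.length = hh := das_len m inv2 hh LR.2 _ _ hL2
      congr 1
      conv_rhs => rw [das_fft]
      rw [if_neg (by omega), if_neg (by omega)]
      dsimp only
      rw [everySecond_eq, everySecond_eq, sliceEvery_comp s hs, sliceEvery_comp s hs]
      rw [← hhh, ← hsplit, ← hL1d, ← hR1d]
      rw [merge_eq m dom s hs L1 R1 (by rw [hlen1, hlen2]) hh 0 (by omega), List.drop_zero]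
      have hz : (L1.zip R1).length = hh := by rw [List.length_zip, hlen1, hlen2]; omega
      rw [hz, show hh - hh = 0 by omega, List.replicate_zero,
        show blk.length - hh - hh = blk.length - 2 * hh by omega]
      simp
termination_by L
decreasing_by all_goals omega

-- ===== VERDICT (by name: the statement is the Claim_ definition above) =====
theorem das_fft_spec : Claim_equal_das_fft := by
  intro a modulus domain inverse_domain inv2 _ hpre
  obtain ⟨hne, _, _⟩ := hpre
  unfold Spec_das_fft das_fft_alt
  rw [run_eval modulus inv2 domain inverse_domain a.length a 1 [] [] rfl (by omega) (by omega)]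
  rw [bRun, sliceEvery_one, sliceEvery_one]
  rfl
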